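-- pv_equiv track=rewrite | github.com/bernardorivas/MorseGraph | ives_model/ives_modules/learning.py | find_neighboring_boxes
-- ===== SOURCE A (Python) =====
-- def find_neighboring_boxes(box_indices, latent_bounds, subdivision_depth):
--     """
--     Find all boxes that share any boundary (face/edge/corner) with given boxes.
--
--     Args:
--         box_indices: Set of box tuples, e.g., {(i, j), ...} for 2D
--         latent_bounds: [lower_bounds, upper_bounds] for latent space
--         subdivision_depth: Grid subdivision depth
--
--     Returns:
--         Expanded set of box indices including neighbors (edge/corner adjacent)
--     """
--     if not box_indices:
--         return set()
--
--     dim = len(latent_bounds[0])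
--     n_boxes = 2 ** subdivision_depth
--
--     # Generate all neighbor offsets (including diagonals)
--     # For 2D: 9 positions (including center)
--     # For 3D: 27 positions (including center)
--     from itertools import product
--     offsets = list(product([-1, 0, 1], repeat=dim))
--
--     expanded_boxes = set()
--     for box_idx in box_indices:
--         for offset in offsets:
--             neighbor_idx = tuple(box_idx[d] + offset[d] for d in range(dim))
--             # Check if neighbor is within valid range
--             if all(0 <= neighbor_idx[d] < n_boxes for d in range(dim)):
--                 expanded_boxes.add(neighbor_idx)
--
--     return expanded_boxes
-- ===== SOURCE B (Python) =====
-- def find_neighboring_boxes(box_indices, latent_bounds, subdivision_depth):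
--     """Per box, build the clipped per-dimension candidate axes first, then take
--     their cartesian product, instead of enumerating all 3**dim offset tuples
--     and re-validating every coordinate of every candidate."""
--     if not box_indices:
--         return set()
--
--     dim = len(latent_bounds[0])
--     n_boxes = 2 ** subdivision_depth
--
--     expanded_boxes = set()
--     for box_idx in box_indices:
--         # valid values of each coordinate after a -1/0/+1 shift
--         axes = [[v for v in (box_idx[d] - 1, box_idx[d], box_idx[d] + 1)
--                  if 0 <= v < n_boxes]
--                 for d in range(dim)]
--         # cartesian product of the axes, built prefix by prefix
--         prefixes = [()]
--         for axis in axes: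
--             prefixes = [p + (v,) for p in prefixes for v in axis]
--         expanded_boxes.update(prefixes)
--     return expanded_boxes
-- ===== Notes on version B (the rewrite author's own statement) =====
-- stated objective: alternative
-- what changed: Instead of enumerating all 3^dim offset tuples per box and re-validating every coordinate of every shifted candidate, B filters the three shifted values per dimension against the grid range first and then takes the cartesian product of these pre-filtered axes, so invalid candidates are pruned before any tuple is built.
import Mathlib
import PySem

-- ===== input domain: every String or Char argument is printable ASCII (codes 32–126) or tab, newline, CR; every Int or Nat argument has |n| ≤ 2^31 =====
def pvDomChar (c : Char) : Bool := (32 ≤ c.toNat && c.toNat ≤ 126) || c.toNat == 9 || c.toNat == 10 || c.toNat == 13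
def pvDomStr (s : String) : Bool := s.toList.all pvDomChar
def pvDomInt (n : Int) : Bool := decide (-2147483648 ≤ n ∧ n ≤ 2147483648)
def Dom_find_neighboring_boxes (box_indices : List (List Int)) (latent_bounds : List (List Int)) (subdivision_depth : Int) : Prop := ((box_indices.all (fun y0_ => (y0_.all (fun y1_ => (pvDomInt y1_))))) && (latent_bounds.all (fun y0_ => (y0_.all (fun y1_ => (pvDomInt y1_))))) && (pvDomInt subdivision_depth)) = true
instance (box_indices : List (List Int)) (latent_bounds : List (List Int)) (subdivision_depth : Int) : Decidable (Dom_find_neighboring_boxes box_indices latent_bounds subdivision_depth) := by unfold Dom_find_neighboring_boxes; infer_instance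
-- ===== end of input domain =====

-- B replaces A's enumeration of all 3^dim offset tuples (each candidate re-validated in every
-- coordinate) by a per-box cartesian product of pre-filtered per-dimension candidate axes
-- (objective: alternative).


-- ===== PORT A =====
-- Hand-port of Python's `0 <= c < 2 ** subdivision_depth` on an int c; exact also for negative
-- depth, where `2 ** depth` is a float: it is positive for depth ≥ -1074 (so the test holds iff
-- c = 0) and underflows to 0.0 below that (so the test is always false).
def pvValidCoordA (depth : Int) (c : Int) : Bool :=
  if 0 ≤ depth then decide (0 ≤ c) && decide (c < 2 ^ depth.toNat)
  else if -1074 ≤ depth then c == 0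
  else false

-- itertools.product([-1, 0, 1], repeat=n), leftmost position varying slowest
def pvOffsets : Nat → List (List Int)
  | 0 => [[]]
  | n + 1 => [-1, 0, 1].flatMap (fun a => (pvOffsets n).map (fun off => a :: off))

def find_neighboring_boxes (box_indices : List (List Int)) (latent_bounds : List (List Int)) (subdivision_depth : Int) : List (List Int) :=
  if box_indices = [] then []
  else
    let dim := (latent_bounds.headD []).length
    let offsets := pvOffsets dim
    box_indices.foldl (fun s box_idx =>
      offsets.foldl (fun s off =>
        let neighbor_idx := (List.range dim).map (fun (d : Nat) =>
          PySem.List.pyGetD box_idx (d : Int) 0 + PySem.List.pyGetD off (d : Int) 0)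
        if (List.range dim).all (fun (d : Nat) =>
            pvValidCoordA subdivision_depth (PySem.List.pyGetD neighbor_idx (d : Int) 0))
        then PySem.Set.add s neighbor_idx else s) s) PySem.Set.empty

-- ===== PORT B =====
-- the same hand-port of `0 <= v < 2 ** subdivision_depth` (see pvValidCoordA for the float cases)
def pvValidCoordB (depth : Int) (v : Int) : Bool :=
  if 0 ≤ depth then decide (0 ≤ v) && decide (v < 2 ^ depth.toNat)
  else if -1074 ≤ depth then v == 0
  else false

def find_neighboring_boxes_alt (box_indices : List (List Int)) (latent_bounds : List (List Int)) (subdivision_depth : Int) : List (List Int) :=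
  if box_indices = [] then []
  else
    let dim := (latent_bounds.headD []).length
    box_indices.foldl (fun s box_idx =>
      let axes := (List.range dim).map (fun (d : Nat) =>
        let c := PySem.List.pyGetD box_idx (d : Int) 0
        [c - 1, c, c + 1].filter (fun v => pvValidCoordB subdivision_depth v))
      let prefixes := axes.foldl (fun ps axis =>
        ps.flatMap (fun p => axis.map (fun v => p ++ [v]))) [[]]
      PySem.Set.update s prefixes) PySem.Set.empty

-- ===== PRECONDITION & SPEC =====
-- Pre_ excludes exactly the inputs where Python A raises an IndexError: when box_indices is
-- non-empty, `latent_bounds[0]` needs latent_bounds ≠ [], and `box_idx[d]` for d < dim needs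
-- every box to have at least dim coordinates.
def Pre_find_neighboring_boxes (box_indices : List (List Int)) (latent_bounds : List (List Int)) (subdivision_depth : Int) : Prop :=
  box_indices = [] ∨
    (latent_bounds ≠ [] ∧
      ∀ b ∈ box_indices, (latent_bounds.headD []).length ≤ b.length)
instance (box_indices : List (List Int)) (latent_bounds : List (List Int)) (subdivision_depth : Int) : Decidable (Pre_find_neighboring_boxes box_indices latent_bounds subdivision_depth) := by unfold Pre_find_neighboring_boxes; infer_instance

def pvWitness_find_neighboring_boxes : List (List Int) × List (List Int) × Int :=
  ([[0, 0], [3, 1]], [[0, 0], [4, 4]], 2)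

def Spec_find_neighboring_boxes (box_indices : List (List Int)) (latent_bounds : List (List Int)) (subdivision_depth : Int) (out : List (List Int)) : Prop := out = find_neighboring_boxes_alt box_indices latent_bounds subdivision_depth
instance (box_indices : List (List Int)) (latent_bounds : List (List Int)) (subdivision_depth : Int) (out : List (List Int)) : Decidable (Spec_find_neighboring_boxes box_indices latent_bounds subdivision_depth out) := by unfold Spec_find_neighboring_boxes; infer_instance

-- ===== CLAIM (what is proved, stated in full; the proofs are below) =====
def Claim_equal_find_neighboring_boxes : Prop := ∀ (box_indices : List (List Int)) (latent_bounds : List (List Int)) (subdivision_depth : Int), Dom_find_neighboring_boxes box_indices latent_bounds subdivision_depth → Pre_find_neighboring_boxes box_indices latent_bounds subdivision_depth → Spec_find_neighboring_boxes box_indices latent_bounds subdivision_depth (find_neighboring_boxes box_indices latent_bounds subdivision_depth)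

-- ===== LEMMAS AND PROOFS =====

-- the lexicographic product of a list of axes, leftmost position varying slowest
def pvProd : List (List Int) → List (List Int)
  | [] => [[]]
  | ax :: rest => ax.flatMap (fun v => (pvProd rest).map (fun t => v :: t))

theorem pv_pyGetD_cons_zero (a : Int) (t : List Int) :
    PySem.List.pyGetD (a :: t) ((0 : Nat) : Int) 0 = a := by
  simp [pysem]

theorem pv_pyGetD_cons_succ (a : Int) (t : List Int) (d : Nat) :
    PySem.List.pyGetD (a :: t) ((Nat.succ d : Nat) : Int) 0 = PySem.List.pyGetD t (d : Int) 0 := by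
  rw [show ((Nat.succ d : Nat) : Int) = ((d + 1 : Nat) : Int) from by push_cast; ring]
  rw [PySem.List.pyGetD_natCast, PySem.List.pyGetD_natCast]
  simp [List.getD]

theorem pv_flatMap_filter {α β : Type} (p : α → Bool) (f : α → List β) (l : List α) :
    (l.filter p).flatMap f = l.flatMap (fun x => if p x then f x else []) := by
  induction l with
  | nil => rfl
  | cons a l ih => by_cases h : p a <;> simp [h, ih]

-- filtering an all-P test through a map that conses a fixed head
theorem pv_filter_all_cons (P : Int → Bool) (h : Int) (f : List Int → List Int)
    (l : List (List Int)) :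
    (l.map (fun t => h :: f t)).filter (fun t => t.all P)
      = if P h then ((l.map f).filter (fun t => t.all P)).map (fun t => h :: t) else [] := by
  induction l with
  | nil => by_cases hp : P h <;> simp [hp]
  | cons a l ih => by_cases hp : P h <;> by_cases ha : (f a).all P <;> simp [hp, ha, ih]

-- a conditional-add fold is a plain add-fold over the filtered candidate list
theorem pv_foldl_ite_add {α : Type} [BEq α] (mk : List Int → α) (q : α → Bool)
    (l : List (List Int)) (s : PySem.Set α) :
    l.foldl (fun s x => if q (mk x) then PySem.Set.add s (mk x) else s) s
      = ((l.map mk).filter q).foldl PySem.Set.add s := by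
  induction l generalizing s with
  | nil => rfl
  | cons a l ih => by_cases h : q (mk a) <;> simp [h, ih]

-- checking all positions of a list of known length is List.all
theorem pv_range_all_pyGetD (P : Int → Bool) (t : List Int) :
    ((List.range t.length).all fun d => P (PySem.List.pyGetD t (d : Int) 0)) = t.all P := by
  induction t with
  | nil => rfl
  | cons a t ih =>
      rw [List.length_cons, List.range_succ_eq_map]
      simp only [List.all_cons, List.all_map, Function.comp_def,
        pv_pyGetD_cons_zero, pv_pyGetD_cons_succ, ih]

theorem pv_range_all_len (P : Int → Bool) (n : Nat) (t : List Int) (h : t.length = n) :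
    ((List.range n).all fun (d : Nat) => P (PySem.List.pyGetD t (d : Int) 0)) = t.all P := by
  subst h; exact pv_range_all_pyGetD P t

-- B's prefix-extending fold computes pvProd
theorem pv_foldl_prefixes (axes : List (List Int)) (ps : List (List Int)) :
    axes.foldl (fun ps axis => ps.flatMap (fun p => axis.map (fun v => p ++ [v]))) ps
      = ps.flatMap (fun p => (pvProd axes).map (fun t => p ++ t)) := by
  induction axes generalizing ps with
  | nil => simp [pvProd]
  | cons ax rest ih =>
      simp only [List.foldl_cons, ih, pvProd]
      simp [List.flatMap_assoc, List.map_flatMap, List.flatMap_map, List.map_map,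
        Function.comp_def, List.append_assoc]

-- the heart: filtering the full 3^n candidate grid equals the product of the filtered axes
theorem pv_main (P : Int → Bool) :
    ∀ (n : Nat) (g : Nat → Int),
      ((pvOffsets n).map (fun off =>
          (List.range n).map (fun d => g d + PySem.List.pyGetD off (d : Int) 0))).filter
        (fun t => t.all P)
      = pvProd ((List.range n).map (fun d => [g d - 1, g d, g d + 1].filter P))
  | 0, g => by simp [pvOffsets, pvProd]
  | n + 1, g => by
      have ih := pv_main P n (fun d => g (d + 1))
      rw [show n + 1 = Nat.succ n from rfl, pvOffsets, List.range_succ_eq_map]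
      simp only [List.flatMap_cons, List.flatMap_nil, List.append_nil, List.map_append,
        List.map_map, List.map_cons, Function.comp_def, pv_pyGetD_cons_zero,
        pv_pyGetD_cons_succ, Nat.succ_eq_add_one, List.filter_append, pvProd]
      rw [pv_filter_all_cons, pv_filter_all_cons, pv_filter_all_cons, ih, pv_flatMap_filter]
      simp only [List.flatMap_cons, List.flatMap_nil, List.append_nil]
      simp [sub_eq_add_neg]

-- one box contributes the same sequence of additions in both programs
theorem pv_step (depth : Int) (dim : Nat) (box : List Int) (s : PySem.Set (List Int)) :
    (pvOffsets dim).foldl (fun s off =>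
        let neighbor_idx := (List.range dim).map (fun (d : Nat) =>
          PySem.List.pyGetD box (d : Int) 0 + PySem.List.pyGetD off (d : Int) 0)
        if (List.range dim).all (fun (d : Nat) =>
            pvValidCoordA depth (PySem.List.pyGetD neighbor_idx (d : Int) 0))
        then PySem.Set.add s neighbor_idx else s) s
      = PySem.Set.update s
          (((List.range dim).map (fun (d : Nat) =>
              let c := PySem.List.pyGetD box (d : Int) 0
              [c - 1, c, c + 1].filter (fun v => pvValidCoordB depth v))).foldl
            (fun ps axis => ps.flatMap (fun p => axis.map (fun v => p ++ [v]))) [[]]) := by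
  have hVB : pvValidCoordB depth = pvValidCoordA depth := rfl
  rw [pv_foldl_prefixes]
  simp only [hVB, List.flatMap_cons, List.flatMap_nil, List.append_nil, List.map_id_fun',
    List.nil_append]
  rw [pv_foldl_ite_add
    (mk := fun off => (List.range dim).map (fun (d : Nat) =>
      PySem.List.pyGetD box (d : Int) 0 + PySem.List.pyGetD off (d : Int) 0))
    (q := fun t => (List.range dim).all (fun (d : Nat) =>
      pvValidCoordA depth (PySem.List.pyGetD t (d : Int) 0)))]
  have hfc : ∀ t ∈ (pvOffsets dim).map (fun off => (List.range dim).map (fun (d : Nat) =>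
        PySem.List.pyGetD box (d : Int) 0 + PySem.List.pyGetD off (d : Int) 0)),
      ((List.range dim).all fun (d : Nat) =>
          pvValidCoordA depth (PySem.List.pyGetD t (d : Int) 0))
        = t.all (pvValidCoordA depth) := by
    intro t ht
    obtain ⟨off, _, rfl⟩ := List.mem_map.1 ht
    exact pv_range_all_len _ dim _ (by simp)
  rw [List.filter_congr hfc, pv_main (pvValidCoordA depth) dim
    (fun (d : Nat) => PySem.List.pyGetD box (d : Int) 0)]
  rfl

-- ===== VERDICT (by name: the statement is the Claim_ definition above) =====
theorem find_neighboring_boxes_spec : Claim_equal_find_neighboring_boxes := by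
  intro box_indices latent_bounds depth _ _
  unfold Spec_find_neighboring_boxes
  by_cases hbe : box_indices = []
  · simp [find_neighboring_boxes, find_neighboring_boxes_alt, hbe]
  · simp only [find_neighboring_boxes, find_neighboring_boxes_alt, if_neg hbe]
    congr 1
    funext s box_idx
    exact pv_step depth ((latent_bounds.headD []).length) box_idx s
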